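-- pv_equiv track=rewrite | github.com/HyunJungJo98/Algorithm-Study | 구현/1244 - 스위치 켜고 끄기.py | female
-- ===== SOURCE A (Python) =====
-- def female(switch, start):
--     left = start-1
--     right = start+1
--     while left >= 0 and right < len(switch) and switch[left] == switch[right]:
--         if switch[left] == 0:
--             switch[left] = 1
--         else:
--             switch[left] = 0
--         if switch[right] == 0:
--             switch[right] = 1
--         else:
--             switch[right] = 0
--         left -= 1
--         right += 1
--     if switch[start] == 0:
--         switch[start] = 1
--     else:
--         switch[start] = 0
--     return switch
-- ===== SOURCE B (Python) =====
-- def female(switch, start):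
--     # Measure the maximal mirror radius on the current values (flipping both
--     # members of an equal pair keeps them equal, so measuring first is valid),
--     # then flip every switch in the block [start-r, start+r] in one pass.
--     r = 0
--     while start - (r + 1) >= 0 and start + (r + 1) < len(switch) and switch[start - (r + 1)] == switch[start + (r + 1)]:
--         r += 1
--     for i in range(start - r, start + r + 1):
--         switch[i] = 1 if switch[i] == 0 else 0
--     return switch
-- ===== Notes on version B (the rewrite author's own statement) =====
-- stated objective: alternative
-- what changed: Instead of A's single expanding loop that toggles each mirror pair as it tests it, B first measures the maximal mirror radius r on the current values (valid because toggling both members of an equal pair keeps them equal) and then flips every switch in the block [start-r, start+r] in one simple second pass; Pre_ excludes only the inputs where A raises IndexError (start outside [-len, len)).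
import Mathlib
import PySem

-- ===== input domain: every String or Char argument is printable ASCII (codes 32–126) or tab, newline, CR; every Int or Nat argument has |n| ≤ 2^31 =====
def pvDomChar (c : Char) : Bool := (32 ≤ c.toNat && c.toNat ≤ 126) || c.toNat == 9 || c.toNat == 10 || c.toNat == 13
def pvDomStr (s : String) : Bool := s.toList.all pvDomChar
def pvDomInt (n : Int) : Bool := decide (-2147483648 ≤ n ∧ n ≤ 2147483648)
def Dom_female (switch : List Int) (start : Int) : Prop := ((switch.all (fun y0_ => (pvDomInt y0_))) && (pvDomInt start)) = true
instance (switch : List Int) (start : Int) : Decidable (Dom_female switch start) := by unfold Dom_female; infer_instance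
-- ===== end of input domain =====

-- B measures the maximal mirror radius first, then flips the whole block in a
-- separate pass (alternative decomposition, same cost); in Python both A and B
-- also mutate the argument list in place, identically.

-- ===== PORT A =====
-- the while loop: toggle each equal mirror pair as it is found, moving outward
def femLoop (switch : List Int) (left right : Int) : List Int :=
  if h : 0 ≤ left ∧ right < (switch.length : Int) ∧
      PySem.List.pyGetD switch left 0 = PySem.List.pyGetD switch right 0 then
    femLoop
      (PySem.List.pySetD
        (PySem.List.pySetD switch left
          (if PySem.List.pyGetD switch left 0 = 0 then 1 else 0))
        right
        (if PySem.List.pyGetD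
              (PySem.List.pySetD switch left
                (if PySem.List.pyGetD switch left 0 = 0 then 1 else 0)) right 0 = 0
         then 1 else 0))
      (left - 1) (right + 1)
  else switch
termination_by ((switch.length : Int) - right).toNat
decreasing_by
  simp only [PySem.List.length_pySetD]
  omega

def female (switch : List Int) (start : Int) : List Int :=
  let res := femLoop switch (start - 1) (start + 1)
  PySem.List.pySetD res start (if PySem.List.pyGetD res start 0 = 0 then 1 else 0)

-- ===== PORT B =====
-- Source B's while loop: maximal radius r with a matching mirror pair at every distance ≤ r
def radLoop (switch : List Int) (start : Int) (r : Nat) : Nat :=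
  if h : 0 ≤ start - ((r : Int) + 1) ∧ start + ((r : Int) + 1) < (switch.length : Int) ∧
      PySem.List.pyGetD switch (start - ((r : Int) + 1)) 0 =
      PySem.List.pyGetD switch (start + ((r : Int) + 1)) 0 then
    radLoop switch start (r + 1)
  else r
termination_by switch.length - r
decreasing_by
  omega

-- Source B's for loop: flip switch[i] for each i in range(start-r, start+r+1)
def female_alt (switch : List Int) (start : Int) : List Int :=
  let r : Int := radLoop switch start 0
  (PySem.List.pyRange (start - r) (start + r + 1) 1).foldl
    (fun s i => PySem.List.pySetD s i (if PySem.List.pyGetD s i 0 = 0 then 1 else 0))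
    switch

-- ===== PRECONDITION & SPEC =====
-- Pre_ excludes exactly the inputs where A raises IndexError: start outside [-len, len)
def Pre_female (switch : List Int) (start : Int) : Prop :=
  -(switch.length : Int) ≤ start ∧ start < (switch.length : Int)
instance (switch : List Int) (start : Int) : Decidable (Pre_female switch start) := by
  unfold Pre_female; infer_instance

def pvWitness_female : List Int × Int := ([1, 0, 1, 0, 1], 2)

def Spec_female (switch : List Int) (start : Int) (out : List Int) : Prop := out = female_alt switch start
instance (switch : List Int) (start : Int) (out : List Int) : Decidable (Spec_female switch start out) := by unfold Spec_female; infer_instance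

-- ===== CLAIM (what is proved, stated in full; the proofs are below) =====
def Claim_equal_female : Prop := ∀ (switch : List Int) (start : Int), Dom_female switch start → Pre_female switch start → Spec_female switch start (female switch start)

-- ===== LEMMAS AND PROOFS =====

-- s with every position in [c-k, c+k] except c toggled (the A-loop's state after k pairs)
def maskP (s : List Int) (c : Int) (k : Nat) : List Int :=
  s.mapIdx (fun i x =>
    if c - (k : Int) ≤ (i : Int) ∧ (i : Int) ≤ c + (k : Int) ∧ (i : Int) ≠ c
    then (if x = 0 then 1 else 0) else x)

-- s with every position in [c-k, c+k] (center included) toggled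
def fullMask (s : List Int) (c : Int) (k : Nat) : List Int :=
  s.mapIdx (fun i x =>
    if c - (k : Int) ≤ (i : Int) ∧ (i : Int) ≤ c + (k : Int)
    then (if x = 0 then 1 else 0) else x)

theorem maskP_length (s : List Int) (c : Int) (k : Nat) : (maskP s c k).length = s.length := by
  simp [maskP]

theorem maskP_zero (s : List Int) (c : Int) : maskP s c 0 = s := by
  apply List.ext_getElem (by simp [maskP])
  intro i h1 h2
  simp only [maskP, List.getElem_mapIdx]
  rw [if_neg (by push_cast; omega)]

theorem pyGetD_maskP_out (s : List Int) (c : Int) (k : Nat) (j : Int)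
    (hj0 : 0 ≤ j) (hjl : j < (s.length : Int))
    (hout : j < c - (k : Int) ∨ c + (k : Int) < j ∨ j = c) :
    PySem.List.pyGetD (maskP s c k) j 0 = PySem.List.pyGetD s j 0 := by
  rw [PySem.List.pyGetD_eq_getElem _ _ hj0 (by rw [maskP_length]; exact hjl),
      PySem.List.pyGetD_eq_getElem _ _ hj0 hjl]
  simp only [maskP, List.getElem_mapIdx]
  rw [if_neg (by omega)]

-- one A-loop iteration turns the k-pair state into the (k+1)-pair state
theorem step_maskP (s : List Int) (c : Int) (k : Nat)
    (h1 : 0 ≤ c - ((k : Int) + 1)) (h2 : c + ((k : Int) + 1) < (s.length : Int)) :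
    PySem.List.pySetD
      (PySem.List.pySetD (maskP s c k) (c - ((k : Int) + 1))
        (if PySem.List.pyGetD (maskP s c k) (c - ((k : Int) + 1)) 0 = 0 then 1 else 0))
      (c + ((k : Int) + 1))
      (if PySem.List.pyGetD
            (PySem.List.pySetD (maskP s c k) (c - ((k : Int) + 1))
              (if PySem.List.pyGetD (maskP s c k) (c - ((k : Int) + 1)) 0 = 0 then 1 else 0))
            (c + ((k : Int) + 1)) 0 = 0 then 1 else 0) =
    maskP s c (k + 1) := by
  have hL : PySem.List.pyGetD (maskP s c k) (c - ((k : Int) + 1)) 0 = s[(c - ((k : Int) + 1)).toNat]'(by omega) := by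
    rw [pyGetD_maskP_out s c k _ (by omega) (by omega) (by omega)]
    rw [PySem.List.pyGetD_eq_getElem _ _ (by omega) (by omega)]
  have hR : PySem.List.pyGetD
      (PySem.List.pySetD (maskP s c k) (c - ((k : Int) + 1))
        (if PySem.List.pyGetD (maskP s c k) (c - ((k : Int) + 1)) 0 = 0 then 1 else 0))
      (c + ((k : Int) + 1)) 0 = s[(c + ((k : Int) + 1)).toNat]'(by omega) := by
    rw [PySem.List.pySetD_of_nonneg _ _ (by omega : (0:Int) ≤ c - ((k : Int) + 1))]
    rw [PySem.List.pyGetD_eq_getElem _ _ (by omega) (by simp [maskP_length]; omega)]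
    rw [List.getElem_set, if_neg (by omega)]
    simp only [maskP, List.getElem_mapIdx]
    rw [if_neg (by omega)]
  rw [hR, hL]
  rw [PySem.List.pySetD_of_nonneg _ _ (by omega : (0:Int) ≤ c - ((k : Int) + 1)),
      PySem.List.pySetD_of_nonneg _ _ (by omega : (0:Int) ≤ c + ((k : Int) + 1))]
  apply List.ext_getElem (by simp [maskP])
  intro i hi1 hi2
  rw [List.getElem_set, List.getElem_set]
  by_cases e2 : (c + ((k : Int) + 1)).toNat = i
  · subst e2
    rw [if_pos rfl]
    simp only [maskP, List.getElem_mapIdx]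
    have hc2 : c - ((k + 1 : Nat) : Int) ≤ (((c + ((k : Int) + 1)).toNat : Nat) : Int) ∧
        (((c + ((k : Int) + 1)).toNat : Nat) : Int) ≤ c + ((k + 1 : Nat) : Int) ∧
        (((c + ((k : Int) + 1)).toNat : Nat) : Int) ≠ c := by omega
    rw [if_pos hc2]
  · rw [if_neg e2]
    by_cases e1 : (c - ((k : Int) + 1)).toNat = i
    · subst e1
      rw [if_pos rfl]
      simp only [maskP, List.getElem_mapIdx]
      have hc1 : c - ((k + 1 : Nat) : Int) ≤ (((c - ((k : Int) + 1)).toNat : Nat) : Int) ∧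
          (((c - ((k : Int) + 1)).toNat : Nat) : Int) ≤ c + ((k + 1 : Nat) : Int) ∧
          (((c - ((k : Int) + 1)).toNat : Nat) : Int) ≠ c := by omega
      rw [if_pos hc1]
    · rw [if_neg e1]
      simp only [maskP, List.getElem_mapIdx]
      by_cases hin : c - ((k : Nat) : Int) ≤ ((i : Nat) : Int) ∧ ((i : Nat) : Int) ≤ c + ((k : Nat) : Int) ∧ ((i : Nat) : Int) ≠ c
      · have hin' : c - ((k + 1 : Nat) : Int) ≤ ((i : Nat) : Int) ∧
            ((i : Nat) : Int) ≤ c + ((k + 1 : Nat) : Int) ∧ ((i : Nat) : Int) ≠ c := by omega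
        rw [if_pos hin, if_pos hin']
      · have hin' : ¬(c - ((k + 1 : Nat) : Int) ≤ ((i : Nat) : Int) ∧
            ((i : Nat) : Int) ≤ c + ((k + 1 : Nat) : Int) ∧ ((i : Nat) : Int) ≠ c) := by omega
        rw [if_neg hin, if_neg hin']

-- the whole A-loop computes the radLoop-radius pair mask
theorem loop_eq (s : List Int) (c : Int) (hc : 0 ≤ c) :
    ∀ (m k : Nat), s.length ≤ k + m →
    femLoop (maskP s c k) (c - ((k : Int) + 1)) (c + ((k : Int) + 1)) =
      maskP s c (radLoop s c k) := by
  intro m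
  induction m with
  | zero =>
    intro k hk
    rw [femLoop, radLoop]
    rw [dif_neg (by rintro ⟨-, hb, -⟩; rw [maskP_length] at hb; omega),
        dif_neg (by rintro ⟨-, hb, -⟩; omega)]
  | succ m ih =>
    intro k hk
    have hiff :
        ((0:Int) ≤ c - ((k : Int) + 1) ∧ c + ((k : Int) + 1) < ((maskP s c k).length : Int) ∧
          PySem.List.pyGetD (maskP s c k) (c - ((k : Int) + 1)) 0 =
          PySem.List.pyGetD (maskP s c k) (c + ((k : Int) + 1)) 0) ↔
        ((0:Int) ≤ c - ((k : Int) + 1) ∧ c + ((k : Int) + 1) < (s.length : Int) ∧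
          PySem.List.pyGetD s (c - ((k : Int) + 1)) 0 =
          PySem.List.pyGetD s (c + ((k : Int) + 1)) 0) := by
      constructor
      · rintro ⟨h1, h2, h3⟩
        rw [maskP_length] at h2
        refine ⟨h1, h2, ?_⟩
        rw [pyGetD_maskP_out s c k _ (by omega) (by omega) (by omega),
            pyGetD_maskP_out s c k _ (by omega) (by omega) (by omega)] at h3
        exact h3
      · rintro ⟨h1, h2, h3⟩
        refine ⟨h1, by rw [maskP_length]; exact h2, ?_⟩
        rw [pyGetD_maskP_out s c k _ (by omega) (by omega) (by omega),
            pyGetD_maskP_out s c k _ (by omega) (by omega) (by omega)]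
        exact h3
    rw [femLoop, radLoop]
    by_cases hcond : (0:Int) ≤ c - ((k : Int) + 1) ∧ c + ((k : Int) + 1) < (s.length : Int) ∧
        PySem.List.pyGetD s (c - ((k : Int) + 1)) 0 =
        PySem.List.pyGetD s (c + ((k : Int) + 1)) 0
    · obtain ⟨h1, h2, h3⟩ := hcond
      rw [dif_pos (hiff.mpr ⟨h1, h2, h3⟩), dif_pos ⟨h1, h2, h3⟩]
      rw [step_maskP s c k h1 h2]
      have eL : c - ((k : Int) + 1) - 1 = c - (((k + 1 : Nat) : Int) + 1) := by push_cast; ring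
      have eR : c + ((k : Int) + 1) + 1 = c + (((k + 1 : Nat) : Int) + 1) := by push_cast; ring
      rw [eL, eR]
      exact ih (k + 1) (by omega)
    · rw [dif_neg (fun h => hcond (hiff.mp h)), dif_neg hcond]

-- flipping the center of the k-pair state gives the full block flip
theorem center_maskP (s : List Int) (c : Int) (k : Nat)
    (h0 : 0 ≤ c) (hl : c < (s.length : Int)) :
    PySem.List.pySetD (maskP s c k) c
      (if PySem.List.pyGetD (maskP s c k) c 0 = 0 then 1 else 0) =
    fullMask s c k := by
  have hread : PySem.List.pyGetD (maskP s c k) c 0 = s[c.toNat]'(by omega) := by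
    rw [pyGetD_maskP_out s c k c h0 hl (by omega)]
    rw [PySem.List.pyGetD_eq_getElem _ _ h0 hl]
  rw [hread, PySem.List.pySetD_of_nonneg _ _ h0]
  apply List.ext_getElem (by simp [maskP, fullMask])
  intro i hi1 hi2
  rw [List.getElem_set]
  by_cases e : c.toNat = i
  · subst e
    rw [if_pos rfl]
    simp only [fullMask, List.getElem_mapIdx]
    have hc : c - ((k : Nat) : Int) ≤ ((c.toNat : Nat) : Int) ∧
        ((c.toNat : Nat) : Int) ≤ c + ((k : Nat) : Int) := by omega
    rw [if_pos hc]
  · rw [if_neg e]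
    simp only [maskP, fullMask, List.getElem_mapIdx]
    by_cases hin : c - ((k : Nat) : Int) ≤ ((i : Nat) : Int) ∧ ((i : Nat) : Int) ≤ c + ((k : Nat) : Int)
    · have hm : c - ((k : Nat) : Int) ≤ ((i : Nat) : Int) ∧
          ((i : Nat) : Int) ≤ c + ((k : Nat) : Int) ∧ ((i : Nat) : Int) ≠ c := ⟨hin.1, hin.2, by omega⟩
      rw [if_pos hm, if_pos hin]
    · have hm : ¬(c - ((k : Nat) : Int) ≤ ((i : Nat) : Int) ∧
          ((i : Nat) : Int) ≤ c + ((k : Nat) : Int) ∧ ((i : Nat) : Int) ≠ c) := by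
        intro h; exact hin ⟨h.1, h.2.1⟩
      rw [if_neg hm, if_neg hin]

-- the radius B measures keeps the block inside the list (for 0 ≤ start < len)
theorem radLoop_bounds (s : List Int) (start : Int) :
    ∀ (m k : Nat), s.length ≤ k + m → 0 ≤ start - (k : Int) → start + (k : Int) < (s.length : Int) →
      0 ≤ start - ((radLoop s start k : Nat) : Int) ∧
      start + ((radLoop s start k : Nat) : Int) < (s.length : Int) := by
  intro m
  induction m with
  | zero =>
    intro k hk h1 h2
    rw [radLoop, dif_neg (by rintro ⟨-, hb, -⟩; omega)]
    exact ⟨h1, h2⟩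
  | succ m ih =>
    intro k hk h1 h2
    rw [radLoop]
    by_cases hcond : (0:Int) ≤ start - ((k : Int) + 1) ∧ start + ((k : Int) + 1) < (s.length : Int) ∧
        PySem.List.pyGetD s (start - ((k : Int) + 1)) 0 =
        PySem.List.pyGetD s (start + ((k : Int) + 1)) 0
    · rw [dif_pos hcond]
      exact ih (k + 1) (by omega) (by push_cast; omega) (by push_cast; omega)
    · rw [dif_neg hcond]
      exact ⟨h1, h2⟩

-- B's for loop over range(a, b) of in-bound indices = toggle exactly [a, b)
theorem fold_flip (a b : Int) :
    ∀ (m : Nat), (b - a).toNat ≤ m → ∀ (s : List Int), 0 ≤ a → b ≤ (s.length : Int) →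
    (PySem.List.pyRange a b 1).foldl
      (fun t i => PySem.List.pySetD t i (if PySem.List.pyGetD t i 0 = 0 then 1 else 0)) s =
    s.mapIdx (fun i x => if a ≤ (i : Int) ∧ (i : Int) < b then (if x = 0 then 1 else 0) else x) := by
  intro m
  induction m generalizing a with
  | zero =>
    intro hm s ha hb
    rw [PySem.List.pyRange_one_eq_nil (by omega)]
    apply List.ext_getElem (by simp)
    intro i hi1 hi2
    simp only [List.foldl_nil, List.getElem_mapIdx]
    rw [if_neg (by omega)]
  | succ m ih =>
    intro hm s ha hb
    by_cases hab : a < b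
    · rw [PySem.List.pyRange_one_cons hab]
      simp only [List.foldl_cons]
      have hset : PySem.List.pySetD s a (if PySem.List.pyGetD s a 0 = 0 then 1 else 0) =
          s.set a.toNat (if s[a.toNat]'(by omega) = 0 then 1 else 0) := by
        rw [PySem.List.pyGetD_eq_getElem _ _ ha (by omega),
            PySem.List.pySetD_of_nonneg _ _ ha]
      rw [hset]
      rw [ih (a + 1) (by omega) _ (by omega) (by simpa using hb)]
      apply List.ext_getElem (by simp)
      intro i hi1 hi2
      simp only [List.getElem_mapIdx, List.getElem_set]
      by_cases e : a.toNat = i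
      · subst e
        split_ifs <;> omega
      · split_ifs <;> omega
    · rw [PySem.List.pyRange_one_eq_nil (by omega)]
      apply List.ext_getElem (by simp)
      intro i hi1 hi2
      simp only [List.foldl_nil, List.getElem_mapIdx]
      rw [if_neg (by omega)]

-- unfolded form of female_alt (the let-bound radius written out)
theorem alt_def (s : List Int) (st : Int) :
    female_alt s st =
      (PySem.List.pyRange (st - ((radLoop s st 0 : Nat) : Int)) (st + ((radLoop s st 0 : Nat) : Int) + 1) 1).foldl
        (fun t i => PySem.List.pySetD t i (if PySem.List.pyGetD t i 0 = 0 then 1 else 0)) s := rfl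

-- ===== VERDICT (by name: the statement is the Claim_ definition above) =====
theorem female_spec : Claim_equal_female := by
  intro switch start _hdom hpre
  have hp : -(switch.length : Int) ≤ start ∧ start < (switch.length : Int) := hpre
  unfold Spec_female
  rw [alt_def]
  by_cases hs : 0 ≤ start
  · -- nonnegative start: both sides are the full block flip of radius r
    obtain ⟨hb1, hb2⟩ := radLoop_bounds switch start switch.length 0 (by omega) (by omega) (by omega)
    have hA : female switch start = fullMask switch start (radLoop switch start 0) := by
      have h0 : femLoop switch (start - 1) (start + 1) =
          maskP switch start (radLoop switch start 0) := by
        have hargs : femLoop switch (start - 1) (start + 1) =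
            femLoop (maskP switch start 0) (start - (((0 : Nat) : Int) + 1)) (start + (((0 : Nat) : Int) + 1)) := by
          rw [maskP_zero]
          norm_num
        rw [hargs]
        exact loop_eq switch start hs switch.length 0 (by omega)
      simp only [female, h0]
      exact center_maskP switch start (radLoop switch start 0) hs hp.2
    rw [hA]
    rw [fold_flip (start - ((radLoop switch start 0 : Nat) : Int))
          (start + ((radLoop switch start 0 : Nat) : Int) + 1) switch.length (by omega) switch
          (by omega) (by omega)]
    apply List.ext_getElem (by simp [fullMask])
    intro i hi1 hi2
    simp only [fullMask, List.getElem_mapIdx]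
    by_cases hin : start - ((radLoop switch start 0 : Nat) : Int) ≤ ((i : Nat) : Int) ∧
        ((i : Nat) : Int) < start + ((radLoop switch start 0 : Nat) : Int) + 1
    · have hl : start - ((radLoop switch start 0 : Nat) : Int) ≤ ((i : Nat) : Int) ∧
          ((i : Nat) : Int) ≤ start + ((radLoop switch start 0 : Nat) : Int) := ⟨hin.1, by omega⟩
      rw [if_pos hl, if_pos hin]
    · have hl : ¬(start - ((radLoop switch start 0 : Nat) : Int) ≤ ((i : Nat) : Int) ∧
          ((i : Nat) : Int) ≤ start + ((radLoop switch start 0 : Nat) : Int)) := by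
        intro h; exact hin ⟨h.1, by omega⟩
      rw [if_neg hl, if_neg hin]
  · -- negative start: the radius is 0 and both sides flip only switch[start]
    have h0 : femLoop switch (start - 1) (start + 1) = switch := by
      rw [femLoop, dif_neg]
      rintro ⟨h1, -, -⟩
      omega
    have hr : radLoop switch start 0 = 0 := by
      rw [radLoop, dif_neg]
      rintro ⟨h1, -, -⟩
      push_cast at h1
      omega
    rw [hr]
    have hrange : PySem.List.pyRange (start - ((0 : Nat) : Int)) (start + ((0 : Nat) : Int) + 1) 1 = [start] := by
      have e1 : start - ((0 : Nat) : Int) = start := by push_cast; ring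
      have e2 : start + ((0 : Nat) : Int) + 1 = start + 1 := by push_cast; ring
      rw [e1, e2, PySem.List.pyRange_one_cons (by omega), PySem.List.pyRange_one_eq_nil (by omega)]
    rw [hrange]
    simp only [List.foldl_cons, List.foldl_nil, female, h0]
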